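-- pv_equiv track=rewrite | github.com/wronai/nlp2cmd | non_llm_schema_extractor.py | _parse_man_sections
-- ===== SOURCE A (Python) =====
-- from typing import Dict, List, Optional, Tuple, Any
--
-- def _parse_man_sections(man_text: str) -> Dict[str, List[str]]:
--     """Parse man page sections."""
--     sections = {}
--     current_section = None
--     current_lines = []
--
--     for line in man_text.split('\n'):
--         if line.isupper() and len(line) < 20:
--             if current_section:
--                 sections[current_section] = current_lines
--             current_section = line
--             current_lines = []
--         else:
--             current_lines.append(line)
--
--     if current_section:
--         sections[current_section] = current_lines
--
--     return sections
-- ===== SOURCE B (Python) =====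
-- def _parse_man_sections(man_text: str):
--     """Parse man page sections (group lines under uppercase headers by takewhile-style slicing)."""
--     def is_header(line):
--         return line.isupper() and len(line) < 20
--
--     lines = man_text.split('\n')
--     # discard everything before the first header
--     while lines and not is_header(lines[0]):
--         lines = lines[1:]
--
--     sections = {}
--     while lines:
--         header, rest = lines[0], lines[1:]
--         body = []
--         while rest and not is_header(rest[0]):
--             body.append(rest.pop(0))
--         sections[header] = body
--         lines = rest
--     return sections
-- ===== Notes on version B (the rewrite author's own statement) =====
-- stated objective: alternative
-- what changed: Replaces A's single-pass flush-on-header accumulator (current_section/current_lines state with a final flush) by a header-first grouping: drop the pre-header prefix, then repeatedly take the header and the takewhile-run of non-header lines as its body.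
import Mathlib
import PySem

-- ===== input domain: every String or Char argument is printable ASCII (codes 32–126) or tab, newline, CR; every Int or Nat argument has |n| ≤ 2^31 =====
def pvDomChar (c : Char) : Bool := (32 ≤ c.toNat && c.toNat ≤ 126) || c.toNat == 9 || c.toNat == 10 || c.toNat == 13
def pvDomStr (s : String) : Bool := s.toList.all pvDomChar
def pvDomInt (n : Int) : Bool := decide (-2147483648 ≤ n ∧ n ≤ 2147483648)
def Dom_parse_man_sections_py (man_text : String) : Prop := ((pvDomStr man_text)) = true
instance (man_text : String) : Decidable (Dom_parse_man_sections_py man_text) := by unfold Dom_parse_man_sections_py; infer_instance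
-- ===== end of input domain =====

-- B replaces A's flush-on-header accumulator with a header-first takewhile/dropwhile grouping (alternative decomposition, same cost).

-- ===== PORT A =====
-- line.isupper() and len(line) < 20; str.isupper ported by hand (exact on the ASCII domain:
-- no lowercase letter and at least one uppercase letter)
def pvIsHeader (l : String) : Bool :=
  (l.toList.all (fun c => !PySem.Chars.islower c) && l.toList.any (fun c => PySem.Chars.isupper c))
    && PySem.Str.len l < 20

-- man_text.split('\n'): split? is some since the separator is nonempty; the for-loop; 'if current_section:' is truthiness, but a header is
-- never the empty string (isupper '' = False), so it is exactly the 'some' test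
def pvLoopA : List String → PySem.Dict String (List String) → Option String → List String →
    PySem.Dict String (List String)
  | [], sections, curSec, curLines =>
      match curSec with
      | some s => sections.insert s curLines
      | none => sections
  | l :: ls, sections, curSec, curLines =>
      if pvIsHeader l then
        pvLoopA ls (match curSec with
                    | some s => sections.insert s curLines
                    | none => sections) (some l) []
      else
        pvLoopA ls sections curSec (curLines ++ [l])

def parse_man_sections_py (man_text : String) : List (String × List String) :=
  (pvLoopA ((PySem.Str.split? man_text "\n").getD []) PySem.Dict.empty none []).items

-- ===== PORT B =====
-- the outer while-loop: take the header, the run of non-header lines as its body, recurse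
def pvGroupB : List String → PySem.Dict String (List String) → PySem.Dict String (List String)
  | [], sections => sections
  | h :: rest, sections =>
      pvGroupB (rest.dropWhile (fun l => !pvIsHeader l))
        (sections.insert h (rest.takeWhile (fun l => !pvIsHeader l)))
termination_by ls _ => ls.length
decreasing_by
  exact Nat.lt_succ_of_le (List.length_dropWhile_le _ _)

def parse_man_sections_py_alt (man_text : String) : List (String × List String) :=
  (pvGroupB (((PySem.Str.split? man_text "\n").getD []).dropWhile (fun l => !pvIsHeader l))
    PySem.Dict.empty).items

-- ===== PRECONDITION & SPEC =====
def Spec_parse_man_sections_py (man_text : String) (out : List (String × List String)) : Prop := out = parse_man_sections_py_alt man_text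
instance (man_text : String) (out : List (String × List String)) : Decidable (Spec_parse_man_sections_py man_text out) := by unfold Spec_parse_man_sections_py; infer_instance

-- ===== CLAIM (what is proved, stated in full; the proofs are below) =====
def Claim_equal_parse_man_sections_py : Prop := ∀ (man_text : String), Dom_parse_man_sections_py man_text → Spec_parse_man_sections_py man_text (parse_man_sections_py man_text)

-- ===== LEMMAS AND PROOFS =====

-- the loop with a pending section s/curLines is the grouping after flushing s with its full body
theorem pvLoopA_some (ls : List String) :
    ∀ (d : PySem.Dict String (List String)) (s : String) (cl : List String),
      pvLoopA ls d (some s) cl =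
        pvGroupB (ls.dropWhile (fun l => !pvIsHeader l))
          (d.insert s (cl ++ ls.takeWhile (fun l => !pvIsHeader l))) := by
  induction ls with
  | nil => intro d s cl; simp [pvLoopA, pvGroupB]
  | cons l ls ih =>
      intro d s cl
      by_cases h : pvIsHeader l
      · simp [pvLoopA, h, List.dropWhile, List.takeWhile, ih, pvGroupB]
      · simp [pvLoopA, h, List.dropWhile, List.takeWhile, ih]

-- the loop before any header was seen drops lines and matches the grouping directly
theorem pvLoopA_none (ls : List String) :
    ∀ (d : PySem.Dict String (List String)) (cl : List String),
      pvLoopA ls d none cl = pvGroupB (ls.dropWhile (fun l => !pvIsHeader l)) d := by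
  induction ls with
  | nil => intro d cl; simp [pvLoopA, pvGroupB]
  | cons l ls ih =>
      intro d cl
      by_cases h : pvIsHeader l
      · simp [pvLoopA, h, List.dropWhile, pvGroupB, pvLoopA_some]
      · simp [pvLoopA, h, List.dropWhile, ih]

-- ===== VERDICT (by name: the statement is the Claim_ definition above) =====
theorem parse_man_sections_py_spec : Claim_equal_parse_man_sections_py := by
  intro man_text _
  unfold Spec_parse_man_sections_py parse_man_sections_py parse_man_sections_py_alt
  rw [pvLoopA_none]
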